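-- pv_equiv track=rewrite | github.com/zyf0717/vascx-fork | vascx_models/geometry/vessel_paths.py | prune_to_inner_outer_nodes
-- ===== SOURCE A (Python) =====
-- from collections import deque
--
-- def prune_to_inner_outer_nodes(
--     neighbors: dict[tuple[int, int], list[tuple[int, int]]],
--     boundary_roles: dict[tuple[int, int], str],
-- ) -> set[tuple[int, int]]:
--     """Remove dead-end skeleton pixels that are not needed for inner-to-outer traces."""
--     active_nodes = set(neighbors)
--     terminal_nodes = set(boundary_roles)
--     queue = deque(
--         node
--         for node in active_nodes
--         if node not in terminal_nodes
--         and sum(1 for neighbor in neighbors[node] if neighbor in active_nodes) <= 1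
--     )
--
--     while queue:
--         node = queue.popleft()
--         if node not in active_nodes or node in terminal_nodes:
--             continue
--         active_degree = sum(
--             1 for neighbor in neighbors[node] if neighbor in active_nodes
--         )
--         if active_degree > 1:
--             continue
--
--         active_nodes.remove(node)
--         for neighbor in neighbors[node]:
--             if neighbor not in active_nodes or neighbor in terminal_nodes:
--                 continue
--             neighbor_degree = sum(
--                 1
--                 for next_neighbor in neighbors[neighbor]
--                 if next_neighbor in active_nodes
--             )
--             if neighbor_degree <= 1:
--                 queue.append(neighbor)
--
--     return active_nodes
-- ===== SOURCE B (Python) =====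
-- from collections import deque
--
--
-- def prune_to_inner_outer_nodes(
--     neighbors: dict[tuple[int, int], list[tuple[int, int]]],
--     boundary_roles: dict[tuple[int, int], str],
-- ) -> set[tuple[int, int]]:
--     """Same pruning, but with incrementally maintained degrees instead of recounting.
--
--     deg[node] counts (with multiplicity) the entries of neighbors[node] that are
--     still active; a reverse-adjacency pair list lets us decrement exactly the
--     affected counters when a node is removed.
--     """
--     active_nodes = set(neighbors)
--     terminal_nodes = set(boundary_roles)
--     deg = {
--         node: sum(1 for nb in nbrs if nb in active_nodes)
--         for node, nbrs in neighbors.items()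
--     }
--     rev = {}
--     for node, nbrs in neighbors.items():
--         for nb in nbrs:
--             rev.setdefault(nb, []).append(node)
--
--     queue = deque(
--         node for node in neighbors
--         if node not in terminal_nodes and deg[node] <= 1
--     )
--     while queue:
--         node = queue.popleft()
--         if node not in active_nodes or node in terminal_nodes:
--             continue
--         if deg[node] > 1:
--             continue
--         active_nodes.remove(node)
--         for y in rev.get(node, []):
--             deg[y] -= 1
--         for nb in neighbors[node]:
--             if nb in active_nodes and nb not in terminal_nodes and deg[nb] <= 1:
--                 queue.append(nb)
--     return active_nodes
-- ===== Notes on version B (the rewrite author's own statement) =====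
-- stated objective: alternative
-- what changed: Instead of recomputing a node's active degree by rescanning its neighbor list at every examination, B precomputes all degrees and a reverse-adjacency map once and maintains the degree counters incrementally (decrementing along the reverse adjacency when a node is removed).
import Mathlib
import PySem

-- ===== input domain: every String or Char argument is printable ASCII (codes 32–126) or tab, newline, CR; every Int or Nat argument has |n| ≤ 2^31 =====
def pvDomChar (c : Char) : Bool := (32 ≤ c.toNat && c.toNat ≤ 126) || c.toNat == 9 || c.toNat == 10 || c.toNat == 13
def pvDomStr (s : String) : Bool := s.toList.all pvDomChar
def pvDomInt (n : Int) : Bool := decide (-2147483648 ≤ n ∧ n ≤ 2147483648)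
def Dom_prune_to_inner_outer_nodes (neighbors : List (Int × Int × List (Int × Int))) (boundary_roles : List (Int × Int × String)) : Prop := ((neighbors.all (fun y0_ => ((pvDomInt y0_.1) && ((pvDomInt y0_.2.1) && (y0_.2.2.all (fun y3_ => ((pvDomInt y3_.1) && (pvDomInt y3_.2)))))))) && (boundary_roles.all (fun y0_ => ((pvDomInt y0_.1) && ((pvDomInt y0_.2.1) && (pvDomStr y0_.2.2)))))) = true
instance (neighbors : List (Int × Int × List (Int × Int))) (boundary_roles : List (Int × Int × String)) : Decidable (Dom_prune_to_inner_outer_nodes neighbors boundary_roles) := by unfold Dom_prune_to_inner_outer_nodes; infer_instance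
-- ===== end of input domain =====

-- B replaces A's repeated degree recounts by incrementally maintained degree counters driven by
-- a precomputed reverse-adjacency map (objective: alternative bookkeeping; return value only).

-- ===== PORT A =====
-- shared input decoding: the Python arguments are dicts over (int, int) keys; per the type
-- convention they arrive as association lists and are rebuilt as PySem.Dict / PySem.Set
def pvNbDict (neighbors : List (Int × Int × List (Int × Int))) : PySem.Dict (Int × Int) (List (Int × Int)) :=
  PySem.Dict.ofList (neighbors.map (fun e => ((e.1, e.2.1), e.2.2)))

def pvTermSet (boundary_roles : List (Int × Int × String)) : PySem.Set (Int × Int) :=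
  PySem.Set.ofList (boundary_roles.map (fun e => (e.1, e.2.1)))

-- sum(1 for neighbor in neighbors[node] if neighbor in active_nodes): a 0/1-sum IS countP;
-- neighbors[node] is only ever read at node ∈ active ⊆ keys, so the [] default is never taken
def pvDegOf (d : PySem.Dict (Int × Int) (List (Int × Int))) (active : List (Int × Int)) (n : Int × Int) : Nat :=
  (d.getD n []).countP (fun z => active.contains z)

-- the while-queue loop of A; `active.erase n` is set.remove (membership checked just above)
def pruneLoopA (d : PySem.Dict (Int × Int) (List (Int × Int))) (term : PySem.Set (Int × Int)) (active : List (Int × Int)) (queue : List (Int × Int)) : List (Int × Int) :=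
  match queue with
  | [] => active
  | n :: qs =>
    if !(active.contains n) || term.contains n then pruneLoopA d term active qs
    else if 1 < pvDegOf d active n then pruneLoopA d term active qs
    else
      pruneLoopA d term (active.erase n)
        (qs ++ (d.getD n []).filter (fun y =>
          (active.erase n).contains y && !(term.contains y) && decide (pvDegOf d (active.erase n) y ≤ 1)))
termination_by (active.length, queue.length)
decreasing_by
  · simp_wf; omega
  · simp_wf; omega
  · simp_wf
    have hm : n ∈ active := by simp_all
    have h1 := List.length_erase_of_mem hm
    have h2 := List.length_pos_of_mem hm
    exact Prod.Lex.left _ _ (by omega)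

-- Python seeds the queue by iterating a SET of int pairs, whose order CPython leaves to its
-- hash table; inside Pre_ the result is seed-order-independent (proved below), so the port
-- fixes an arbitrary representative order (reversed insertion order) for the seeding.
def prune_to_inner_outer_nodes (neighbors : List (Int × Int × List (Int × Int))) (boundary_roles : List (Int × Int × String)) : List (Int × Int) :=
  let d := pvNbDict neighbors
  let term := pvTermSet boundary_roles
  let active := d.keys
  pruneLoopA d term active
    ((active.filter (fun n => !(term.contains n) && decide (pvDegOf d active n ≤ 1))).reverse)

-- ===== PORT B =====
-- reverse-adjacency pair list: one (x, node) per occurrence of x in neighbors[node]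
def pvRevPairs (d : PySem.Dict (Int × Int) (List (Int × Int))) : List ((Int × Int) × (Int × Int)) :=
  d.items.flatMap (fun p => p.2.map (fun x => (x, p.1)))

-- rev.setdefault(x, []).append(node)
def pvRevDict (d : PySem.Dict (Int × Int) (List (Int × Int))) : PySem.Dict (Int × Int) (List (Int × Int)) :=
  (pvRevPairs d).foldl (fun r q => r.modify q.1 [] (· ++ [q.2])) PySem.Dict.empty

-- deg = {node: sum(1 for nb in nbrs if nb in active_nodes) for node, nbrs in neighbors.items()}
def pvDegDict (d : PySem.Dict (Int × Int) (List (Int × Int))) : PySem.Dict (Int × Int) Int :=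
  PySem.Dict.ofList (d.items.map (fun p => (p.1, (p.2.countP (fun z => (d.keys).contains z) : Int))))

-- B's while-queue loop: reads counters, decrements them along the reverse adjacency on removal
def pruneLoopB (d : PySem.Dict (Int × Int) (List (Int × Int))) (rev : PySem.Dict (Int × Int) (List (Int × Int))) (term : PySem.Set (Int × Int)) (active : List (Int × Int)) (deg : PySem.Dict (Int × Int) Int) (queue : List (Int × Int)) : List (Int × Int) :=
  match queue with
  | [] => active
  | n :: qs =>
    if !(active.contains n) || term.contains n then pruneLoopB d rev term active deg qs
    else if 1 < deg.getD n 0 then pruneLoopB d rev term active deg qs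
    else
      pruneLoopB d rev term (active.erase n)
        ((rev.getD n []).foldl (fun m y => m.modify y 0 (· - 1)) deg)
        (qs ++ (d.getD n []).filter (fun y =>
          (active.erase n).contains y && !(term.contains y) &&
            decide (((rev.getD n []).foldl (fun m y => m.modify y 0 (· - 1)) deg).getD y 0 ≤ 1)))
termination_by (active.length, queue.length)
decreasing_by
  · simp_wf; omega
  · simp_wf; omega
  · simp_wf
    have hm : n ∈ active := by simp_all
    have h1 := List.length_erase_of_mem hm
    have h2 := List.length_pos_of_mem hm
    exact Prod.Lex.left _ _ (by omega)

def prune_to_inner_outer_nodes_alt (neighbors : List (Int × Int × List (Int × Int))) (boundary_roles : List (Int × Int × String)) : List (Int × Int) :=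
  let d := pvNbDict neighbors
  let term := pvTermSet boundary_roles
  let active := d.keys
  let deg := pvDegDict d
  pruneLoopB d (pvRevDict d) term active deg
    (active.filter (fun n => !(term.contains n) && decide (deg.getD n 0 ≤ 1)))

-- ===== PRECONDITION & SPEC =====
-- Pre_ excludes inputs whose key-to-key adjacency is not symmetric counted with multiplicity:
-- there A's surviving set can depend on CPython's hash-based set iteration order seeding the
-- queue (an accidental, unspecifiable tie-break); any of those orders' results is defensible.
def Pre_prune_to_inner_outer_nodes (neighbors : List (Int × Int × List (Int × Int))) (boundary_roles : List (Int × Int × String)) : Prop :=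
  ∀ p ∈ (pvNbDict neighbors).items, ∀ x ∈ p.2,
    (pvNbDict neighbors).contains x = true →
      p.2.count x = ((pvNbDict neighbors).getD x []).count p.1
instance (neighbors : List (Int × Int × List (Int × Int))) (boundary_roles : List (Int × Int × String)) : Decidable (Pre_prune_to_inner_outer_nodes neighbors boundary_roles) := by unfold Pre_prune_to_inner_outer_nodes; infer_instance

def pvWitness_prune_to_inner_outer_nodes : (List (Int × Int × List (Int × Int))) × (List (Int × Int × String)) :=
  ([(0, 0, [(1, 1)]), (1, 1, [(0, 0), (2, 2)]), (2, 2, [(1, 1)])], [(0, 0, "inner")])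

def Spec_prune_to_inner_outer_nodes (neighbors : List (Int × Int × List (Int × Int))) (boundary_roles : List (Int × Int × String)) (out : List (Int × Int)) : Prop := out = prune_to_inner_outer_nodes_alt neighbors boundary_roles
instance (neighbors : List (Int × Int × List (Int × Int))) (boundary_roles : List (Int × Int × String)) (out : List (Int × Int)) : Decidable (Spec_prune_to_inner_outer_nodes neighbors boundary_roles out) := by unfold Spec_prune_to_inner_outer_nodes; infer_instance

-- ===== CLAIM (what is proved, stated in full; the proofs are below) =====
def Claim_equal_prune_to_inner_outer_nodes : Prop := ∀ (neighbors : List (Int × Int × List (Int × Int))) (boundary_roles : List (Int × Int × String)), Dom_prune_to_inner_outer_nodes neighbors boundary_roles → Pre_prune_to_inner_outer_nodes neighbors boundary_roles → Spec_prune_to_inner_outer_nodes neighbors boundary_roles (prune_to_inner_outer_nodes neighbors boundary_roles)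

-- ===== LEMMAS AND PROOFS =====

-- decrement loop: getD after the fold is the old value minus the multiplicity
theorem pv_getD_foldl_modify_sub_one (l : List (Int × Int)) (m : PySem.Dict (Int × Int) Int) (y : Int × Int) :
    ((l.foldl (fun m x => m.modify x 0 (· - 1)) m).getD y 0) = m.getD y 0 - l.count y := by
  induction l generalizing m with
  | nil => simp
  | cons a t ih =>
    simp only [List.foldl_cons, ih, PySem.Dict.getD_modify, List.count_cons]
    by_cases h : y = a
    · subst h; simp; omega
    · have : (a == y) = false := by simpa using fun h' => h h'.symm
      simp [h, this]

-- counting against the erased active set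
theorem pv_countP_erase (l active : List (Int × Int)) (n : Int × Int)
    (hnd : active.Nodup) (hm : n ∈ active) :
    l.countP (fun z => (active.erase n).contains z) + l.count n
      = l.countP (fun z => active.contains z) := by
  induction l with
  | nil => simp
  | cons a t ih =>
    by_cases ha : a = n
    · have h1 : ((active.erase n).contains a) = false := by
        subst ha; simpa using List.Nodup.not_mem_erase hnd
      have h2 : (active.contains a) = true := by subst ha; simpa using hm
      have h5 : (a == n) = true := by simp [ha]
      simp only [List.countP_cons, List.count_cons, h1, h2, h5]
      simp only [Bool.false_eq_true, if_false, if_true]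
      omega
    · have h1 : ((active.erase n).contains a) = (active.contains a) := by
        by_cases hmem : a ∈ active
        · simp [List.mem_erase_of_ne ha, hmem]
        · simp [List.mem_erase_of_ne ha, hmem]
      have h5 : (a == n) = false := by simpa using ha
      simp only [List.countP_cons, List.count_cons, h1, h5]
      cases hac : (active.contains a) <;>
        simp only [Bool.false_eq_true, if_false, if_true] <;> omega

theorem pv_head_count (X Y : Int × Int) (lst : List (Int × Int)) (k : Int × Int) :
    List.count Y (List.map (fun q => q.2) (List.filter (fun q => q.1 == X) (List.map (fun x => (x, k)) lst)))
      = if k = Y then lst.count X else 0 := by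
  rw [List.count_eq_countP, List.countP_map, List.countP_filter, List.countP_map]
  by_cases hk : k = Y
  · subst hk
    simp [List.count_eq_countP, Function.comp_def]
  · have : (k == Y) = false := by simpa using hk
    simp [Function.comp_def, this, hk]

-- the reverse pair list counts occurrences transposed (over an items list with distinct keys)
theorem pv_rev_count_aux (L : List ((Int × Int) × List (Int × Int))) (X Y : Int × Int)
    (h : (L.map (·.1)).Nodup) :
    List.count Y (List.map (fun q => q.2) (List.filter (fun q => q.1 == X) (L.flatMap (fun p => p.2.map (fun x => (x, p.1))))))
      = List.count X (((L.find? (fun p => p.1 == Y)).map (·.2)).getD []) := by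
  induction L with
  | nil => simp
  | cons p L' ih =>
    rw [List.map_cons] at h
    have hnotin : p.1 ∉ L'.map (·.1) := (List.nodup_cons.mp h).1
    have hnd' : (L'.map (·.1)).Nodup := (List.nodup_cons.mp h).2
    simp only [List.flatMap_cons, List.filter_append, List.map_append, List.count_append,
      List.find?_cons]
    by_cases hpY : p.1 = Y
    · have hb : (p.1 == Y) = true := by simp [hpY]
      rw [hb]
      have htail : List.count Y (List.map (fun q => q.2) (List.filter (fun q => q.1 == X) (L'.flatMap (fun p => p.2.map (fun x => (x, p.1)))))) = 0 := by
        rw [ih hnd']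
        have hfn : L'.find? (fun p => p.1 == Y) = none := by
          rw [List.find?_eq_none]
          intro x hx hxy
          exact hnotin (by subst hpY; exact (List.mem_map.mpr ⟨x, hx, by simpa using hxy⟩))
        simp [hfn]
      rw [pv_head_count, htail, if_pos hpY]
      simp
    · have hb : (p.1 == Y) = false := by simpa using hpY
      rw [hb]
      rw [pv_head_count, if_neg hpY, ih hnd']
      simp

-- the reverse dict counts occurrences transposed
theorem pv_rev_count (d : PySem.Dict (Int × Int) (List (Int × Int))) (hnd : d.keys.Nodup) (X Y : Int × Int) :
    ((pvRevDict d).getD X []).count Y = (d.getD Y []).count X := by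
  unfold pvRevDict pvRevPairs
  rw [PySem.Dict.getD_foldl_modify_append]
  have hk : (d.items.map (·.1)).Nodup := by simpa [PySem.Dict.keys] using hnd
  rw [show PySem.Dict.empty.getD X ([] : List (Int × Int)) = [] from by simp]
  simp only [List.nil_append]
  rw [pv_rev_count_aux _ X Y hk]
  rw [PySem.Dict.getD_eq_get?_getD]
  simp [PySem.Dict.get?]

theorem pv_degDict_items (d : PySem.Dict (Int × Int) (List (Int × Int))) (hnd : d.keys.Nodup) :
    (pvDegDict d).items = d.items.map (fun p => (p.1, (p.2.countP (fun z => (d.keys).contains z) : Int))) := by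
  unfold pvDegDict
  have hfst : ((d.items.map (fun p => (p.1, (p.2.countP (fun z => (d.keys).contains z) : Int)))).map (·.1)).Nodup := by
    simpa [List.map_map, Function.comp_def, PySem.Dict.keys] using hnd
  have := PySem.Dict.items_foldl_insert_fresh
    (d.items.map (fun p => (p.1, (p.2.countP (fun z => (d.keys).contains z) : Int))))
    (fun a => a.1) (fun a => a.2) PySem.Dict.empty
    (by intro a _; simp) (by simpa using hfst)
  simpa [PySem.Dict.ofList, PySem.Dict.update] using this

-- the initial degree dictionary agrees with recounted degrees
theorem pv_degDict_getD (d : PySem.Dict (Int × Int) (List (Int × Int))) (hnd : d.keys.Nodup) (y : Int × Int) :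
    (pvDegDict d).getD y 0 = (pvDegOf d d.keys y : Int) := by
  by_cases hy : y ∈ d.keys
  · obtain ⟨p, hp, hp1⟩ : ∃ p ∈ d.items, p.1 = y := by
      simpa [PySem.Dict.keys, List.mem_map] using hy
    have hitems := pv_degDict_items d hnd
    have hmem : (y, (p.2.countP (fun z => (d.keys).contains z) : Int)) ∈ (pvDegDict d).items := by
      rw [hitems]; exact List.mem_map.mpr ⟨p, hp, by rw [hp1]⟩
    have hnd2 : (pvDegDict d).keys.Nodup := by
      have : (pvDegDict d).keys = d.keys := by
        simp [PySem.Dict.keys, hitems, List.map_map, Function.comp_def]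
      rw [this]; exact hnd
    rw [PySem.Dict.getD_of_mem_items _ hmem hnd2]
    have hdv : d.getD y [] = p.2 := by
      have : (y, p.2) ∈ d.items := by rw [← hp1]; exact hp
      exact PySem.Dict.getD_of_mem_items _ this hnd _
    unfold pvDegOf
    rw [hdv]
  · have hc : (pvDegDict d).contains y = false := by
      have hkeq : (pvDegDict d).keys = d.keys := by
        simp [PySem.Dict.keys, pv_degDict_items d hnd, List.map_map, Function.comp_def]
      rw [← Bool.not_eq_true]
      intro hcon
      exact hy (hkeq ▸ (PySem.Dict.contains_iff_mem_keys _ _).mp hcon)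
    have hcd : d.contains y = false := by
      rw [← Bool.not_eq_true]
      intro hcon
      exact hy ((PySem.Dict.contains_iff_mem_keys _ _).mp hcon)
    rw [PySem.Dict.getD_of_not_contains _ _ hc]
    unfold pvDegOf
    rw [PySem.Dict.getD_of_not_contains _ _ hcd]
    simp

-- eligibility for removal, queue completeness, and stability of a node set
def pvElig (d : PySem.Dict (Int × Int) (List (Int × Int))) (term : PySem.Set (Int × Int)) (active : List (Int × Int)) (y : Int × Int) : Prop :=
  active.contains y = true ∧ term.contains y = false ∧ pvDegOf d active y ≤ 1

def pvStable (d : PySem.Dict (Int × Int) (List (Int × Int))) (term : PySem.Set (Int × Int)) (R : List (Int × Int)) : Prop :=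
  ∀ y, y ∈ R → term.contains y = false → ¬ (pvDegOf d R y ≤ 1)

-- key-to-key adjacency symmetric with multiplicity (what Pre_ provides)
def pvSym (d : PySem.Dict (Int × Int) (List (Int × Int))) : Prop :=
  ∀ y x : Int × Int, d.contains y = true → d.contains x = true →
    0 < (d.getD y []).count x → (d.getD y []).count x = (d.getD x []).count y

-- two sublists of a duplicate-free list with the same members are equal
theorem pv_sublist_eq_of_mem_iff : ∀ (l l1 l2 : List (Int × Int)), l1.Sublist l → l2.Sublist l → l.Nodup → (∀ x, x ∈ l1 ↔ x ∈ l2) → l1 = l2 := by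
  intro l
  induction l with
  | nil =>
    intro l1 l2 h1 h2 _ _
    rw [List.sublist_nil.mp h1, List.sublist_nil.mp h2]
  | cons a t ih =>
    intro l1 l2 h1 h2 hnd hm
    have hat : a ∉ t := (List.nodup_cons.mp hnd).1
    have hndt : t.Nodup := (List.nodup_cons.mp hnd).2
    rcases List.sublist_cons_iff.mp h1 with h1t | ⟨r1, rfl, hr1⟩
    · rcases List.sublist_cons_iff.mp h2 with h2t | ⟨r2, rfl, hr2⟩
      · exact ih _ _ h1t h2t hndt hm
      · exact absurd (h1t.subset ((hm a).mpr (by simp))) hat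
    · rcases List.sublist_cons_iff.mp h2 with h2t | ⟨r2, rfl, hr2⟩
      · exact absurd (h2t.subset ((hm a).mp (by simp))) hat
      · have har1 : a ∉ r1 := fun h => hat (hr1.subset h)
        have har2 : a ∉ r2 := fun h => hat (hr2.subset h)
        have hmr : ∀ x, x ∈ r1 ↔ x ∈ r2 := by
          intro x
          constructor
          · intro hx
            have hxa : x ≠ a := fun he => har1 (he ▸ hx)
            have := (hm x).mp (by simp [hx])
            simpa [hxa] using this
          · intro hx
            have hxa : x ≠ a := fun he => har2 (he ▸ hx)
            have := (hm x).mpr (by simp [hx])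
            simpa [hxa] using this
        rw [ih _ _ hr1 hr2 hndt hmr]

-- the loop only ever erases elements: the survivors are a sublist of active
theorem pv_loopA_sublist (d : PySem.Dict (Int × Int) (List (Int × Int))) (term : PySem.Set (Int × Int)) :
    ∀ (active queue : List (Int × Int)), (pruneLoopA d term active queue).Sublist active := by
  intro active queue
  induction active, queue using pruneLoopA.induct d term with
  | case1 active => rw [pruneLoopA]
  | case2 active n qs hcond ih => rw [pruneLoopA, if_pos hcond]; exact ih
  | case3 active n qs hcond hdegc ih => rw [pruneLoopA, if_neg hcond, if_pos hdegc]; exact ih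
  | case4 active n qs hcond hdegc ih =>
    rw [pruneLoopA, if_neg hcond, if_neg hdegc]
    exact ih.trans (List.erase_sublist)

-- soundness: the loop never removes a member of a stable subset of active
theorem pv_loopA_sound (d : PySem.Dict (Int × Int) (List (Int × Int))) (term : PySem.Set (Int × Int))
    (T : List (Int × Int)) (hstable : pvStable d term T) :
    ∀ (active queue : List (Int × Int)), (∀ x ∈ T, x ∈ active) →
      ∀ x ∈ T, x ∈ pruneLoopA d term active queue := by
  intro active queue
  induction active, queue using pruneLoopA.induct d term with
  | case1 active =>
    intro hsub x hx
    rw [pruneLoopA]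
    exact hsub x hx
  | case2 active n qs hcond ih =>
    intro hsub
    rw [pruneLoopA, if_pos hcond]
    exact ih hsub
  | case3 active n qs hcond hdegc ih =>
    intro hsub
    rw [pruneLoopA, if_neg hcond, if_pos hdegc]
    exact ih hsub
  | case4 active n qs hcond hdegc ih =>
    intro hsub
    rw [pruneLoopA, if_neg hcond, if_neg hdegc]
    have hterm : term.contains n = false := by
      simp only [Bool.or_eq_true, Bool.not_eq_true', not_or, Bool.not_eq_true] at hcond
      exact hcond.2
    have hnT : n ∉ T := by
      intro hnT
      apply hstable n hnT hterm
      have hmono : pvDegOf d T n ≤ pvDegOf d active n := by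
        unfold pvDegOf
        apply List.countP_mono_left
        intro z _ hz
        have : z ∈ T := by simpa using hz
        simpa using hsub z this
      omega
    apply ih
    intro x hx
    exact (List.mem_erase_of_ne (fun he => hnT (by rw [← he]; exact hx))).mpr (hsub x hx)

-- completeness: if the queue contains every eligible node, the survivors are stable
theorem pv_loopA_complete (d : PySem.Dict (Int × Int) (List (Int × Int))) (term : PySem.Set (Int × Int))
    (hsym : pvSym d) :
    ∀ (active queue : List (Int × Int)), active.Nodup →
      (∀ x ∈ active, d.contains x = true) →
      (∀ y, pvElig d term active y → y ∈ queue) →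
      pvStable d term (pruneLoopA d term active queue) := by
  intro active queue
  induction active, queue using pruneLoopA.induct d term with
  | case1 active =>
    intro _ _ hq
    rw [pruneLoopA]
    intro y hy hterm hdeg
    exact absurd (hq y ⟨by simpa using hy, hterm, hdeg⟩) (List.not_mem_nil)
  | case2 active n qs hcond ih =>
    intro hnodup hkeys hq
    rw [pruneLoopA, if_pos hcond]
    apply ih hnodup hkeys
    intro y hy
    rcases List.mem_cons.mp (hq y hy) with hn | hqs
    · exfalso
      have h1 := hy.1
      have h2 := hy.2.1
      rw [hn] at h1 h2
      simp only [Bool.or_eq_true, Bool.not_eq_true'] at hcond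
      rcases hcond with hc | hc
      · simp_all
      · simp_all
    · exact hqs
  | case3 active n qs hcond hdegc ih =>
    intro hnodup hkeys hq
    rw [pruneLoopA, if_neg hcond, if_pos hdegc]
    apply ih hnodup hkeys
    intro y hy
    rcases List.mem_cons.mp (hq y hy) with hn | hqs
    · exfalso
      have := hy.2.2
      rw [hn] at this
      omega
    · exact hqs
  | case4 active n qs hcond hdegc ih =>
    intro hnodup hkeys hq
    rw [pruneLoopA, if_neg hcond, if_neg hdegc]
    have hcn : active.contains n = true ∧ term.contains n = false := by
      simp only [Bool.or_eq_true, Bool.not_eq_true', not_or, Bool.not_eq_true] at hcond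
      exact ⟨by simpa using hcond.1, hcond.2⟩
    have hm : n ∈ active := by simpa using hcn.1
    apply ih (hnodup.erase n) (fun x hx => hkeys x (List.erase_sublist.subset hx))
    intro y hy
    obtain ⟨hyc, hyterm, hydeg⟩ := hy
    have hymem : y ∈ active.erase n := by simpa using hyc
    have hymem0 : y ∈ active := List.erase_sublist.subset hymem
    have hyne : y ≠ n := by
      intro he
      exact (List.Nodup.not_mem_erase hnodup) (he ▸ hymem)
    have hcount := pv_countP_erase (d.getD y []) active n hnodup hm
    by_cases hold : pvDegOf d active y ≤ 1
    · rcases List.mem_cons.mp (hq y ⟨by simpa using hymem0, hyterm, hold⟩) with hn | hqs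
      · exact absurd hn hyne
      · exact List.mem_append_left _ hqs
    · -- degree dropped: n occurs in neighbors[y], so by symmetry y occurs in neighbors[n]
      apply List.mem_append_right
      have hcountpos : 0 < (d.getD y []).count n := by
        unfold pvDegOf at hold hydeg
        omega
      have hky : d.contains y = true := hkeys y hymem0
      have hkn : d.contains n = true := hkeys n hm
      have hsymc := hsym y n hky hkn hcountpos
      have hyinn : y ∈ d.getD n [] := by
        rw [← List.count_pos_iff, ← hsymc]
        exact hcountpos
      rw [List.mem_filter]
      refine ⟨hyinn, ?_⟩
      have ht : y ∉ term := by simpa using hyterm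
      simp [hydeg, hymem, ht]

-- confluence: any two seedings containing every eligible node give the same survivors
theorem pv_loopA_order_irrelevant (d : PySem.Dict (Int × Int) (List (Int × Int))) (term : PySem.Set (Int × Int))
    (hsym : pvSym d) (active q1 q2 : List (Int × Int)) (hnodup : active.Nodup)
    (hkeys : ∀ x ∈ active, d.contains x = true)
    (h1 : ∀ y, pvElig d term active y → y ∈ q1)
    (h2 : ∀ y, pvElig d term active y → y ∈ q2) :
    pruneLoopA d term active q1 = pruneLoopA d term active q2 := by
  apply pv_sublist_eq_of_mem_iff active _ _ (pv_loopA_sublist d term active q1) (pv_loopA_sublist d term active q2) hnodup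
  intro x
  constructor
  · intro hx
    exact pv_loopA_sound d term _ (pv_loopA_complete d term hsym active q1 hnodup hkeys h1)
      active q2 (fun z hz => (pv_loopA_sublist d term active q1).subset hz) x hx
  · intro hx
    exact pv_loopA_sound d term _ (pv_loopA_complete d term hsym active q2 hnodup hkeys h2)
      active q1 (fun z hz => (pv_loopA_sublist d term active q2).subset hz) x hx

-- Pre_ gives the symmetry the confluence argument needs
theorem pv_pre_sym (neighbors : List (Int × Int × List (Int × Int))) (boundary_roles : List (Int × Int × String))
    (hpre : Pre_prune_to_inner_outer_nodes neighbors boundary_roles) :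
    pvSym (pvNbDict neighbors) := by
  intro y x hcy hcx hpos
  have hnd : (pvNbDict neighbors).keys.Nodup := PySem.Dict.nodup_keys_ofList _
  obtain ⟨p, hp, hp1⟩ : ∃ p ∈ (pvNbDict neighbors).items, p.1 = y := by
    have := (PySem.Dict.contains_iff_mem_keys _ _).mp hcy
    simpa [PySem.Dict.keys, List.mem_map] using this
  have hgd : (pvNbDict neighbors).getD y [] = p.2 := by
    have : (y, p.2) ∈ (pvNbDict neighbors).items := by rw [← hp1]; exact hp
    exact PySem.Dict.getD_of_mem_items _ this hnd _
  have hxin : x ∈ p.2 := by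
    rw [hgd] at hpos
    exact List.count_pos_iff.mp hpos
  have := hpre p hp x hxin hcx
  rw [hgd, this, hp1]

-- main simulation: B's counter dictionary tracks A's recount at every loop state
theorem pv_loop_eq (d : PySem.Dict (Int × Int) (List (Int × Int))) (hnd : d.keys.Nodup)
    (term : PySem.Set (Int × Int)) :
    ∀ (active queue : List (Int × Int)), active.Nodup →
      ∀ (deg : PySem.Dict (Int × Int) Int),
        (∀ y, deg.getD y 0 = (pvDegOf d active y : Int)) →
        pruneLoopA d term active queue = pruneLoopB d (pvRevDict d) term active deg queue := by
  intro active queue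
  induction active, queue using pruneLoopA.induct d term with
  | case1 active =>
    intro _ deg _
    simp [pruneLoopA, pruneLoopB]
  | case2 active n qs hcond ih =>
    intro hnodup deg hdeg
    rw [pruneLoopA, pruneLoopB]
    rw [if_pos hcond, if_pos hcond]
    exact ih hnodup deg hdeg
  | case3 active n qs hcond hdegc ih =>
    intro hnodup deg hdeg
    rw [pruneLoopA, pruneLoopB]
    rw [if_neg hcond, if_neg hcond]
    have hdegc' : 1 < deg.getD n 0 := by rw [hdeg n]; exact_mod_cast hdegc
    rw [if_pos hdegc, if_pos hdegc']
    exact ih hnodup deg hdeg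
  | case4 active n qs hcond hdegc ih =>
    intro hnodup deg hdeg
    rw [pruneLoopA, pruneLoopB]
    rw [if_neg hcond, if_neg hcond]
    have hdegc' : ¬ 1 < deg.getD n 0 := by rw [hdeg n]; exact_mod_cast hdegc
    rw [if_neg hdegc, if_neg hdegc']
    have hm : n ∈ active := by simp_all
    have hdeg' : ∀ y, (((pvRevDict d).getD n []).foldl (fun m y => m.modify y 0 (· - 1)) deg).getD y 0
        = (pvDegOf d (active.erase n) y : Int) := by
      intro y
      rw [pv_getD_foldl_modify_sub_one, pv_rev_count d hnd n y, hdeg y]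
      have h := pv_countP_erase (d.getD y []) active n hnodup hm
      unfold pvDegOf at *
      omega
    have hfeq : (d.getD n []).filter (fun y =>
          (active.erase n).contains y && !(term.contains y) && decide (pvDegOf d (active.erase n) y ≤ 1))
        = (d.getD n []).filter (fun y =>
          (active.erase n).contains y && !(term.contains y) &&
            decide ((((pvRevDict d).getD n []).foldl (fun m y => m.modify y 0 (· - 1)) deg).getD y 0 ≤ 1)) := by
      apply List.filter_congr
      intro y _
      have : decide ((((pvRevDict d).getD n []).foldl (fun m y => m.modify y 0 (· - 1)) deg).getD y 0 ≤ 1)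
          = decide (pvDegOf d (active.erase n) y ≤ 1) := by
        rw [hdeg' y]
        exact decide_eq_decide.mpr (by exact_mod_cast Iff.rfl)
      rw [this]
    rw [← hfeq]
    exact ih (hnodup.erase n) _ hdeg'

-- ===== VERDICT (by name: the statement is the Claim_ definition above) =====
theorem prune_to_inner_outer_nodes_spec : Claim_equal_prune_to_inner_outer_nodes := by
  intro neighbors boundary_roles _ hpre
  unfold Spec_prune_to_inner_outer_nodes
  unfold prune_to_inner_outer_nodes prune_to_inner_outer_nodes_alt
  simp only []
  have hnd : (pvNbDict neighbors).keys.Nodup := PySem.Dict.nodup_keys_ofList _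
  rw [pv_loopA_order_irrelevant (pvNbDict neighbors) (pvTermSet boundary_roles)
    (pv_pre_sym neighbors boundary_roles hpre) (pvNbDict neighbors).keys _
    (((pvNbDict neighbors).keys).filter (fun n => !((pvTermSet boundary_roles).contains n) && decide (pvDegOf (pvNbDict neighbors) (pvNbDict neighbors).keys n ≤ 1)))
    hnd
    (fun x hx => (PySem.Dict.contains_iff_mem_keys _ _).mpr hx)
    (by
      intro y hy
      have ht : y ∉ pvTermSet boundary_roles := by simpa using hy.2.1
      rw [List.mem_reverse, List.mem_filter]
      exact ⟨by simpa using hy.1, by simp [ht, hy.2.2]⟩)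
    (by
      intro y hy
      have ht : y ∉ pvTermSet boundary_roles := by simpa using hy.2.1
      rw [List.mem_filter]
      exact ⟨by simpa using hy.1, by simp [ht, hy.2.2]⟩)]
  have hfeq : ((pvNbDict neighbors).keys).filter (fun n =>
        !((pvTermSet boundary_roles).contains n) && decide (pvDegOf (pvNbDict neighbors) (pvNbDict neighbors).keys n ≤ 1))
      = ((pvNbDict neighbors).keys).filter (fun n =>
        !((pvTermSet boundary_roles).contains n) && decide ((pvDegDict (pvNbDict neighbors)).getD n 0 ≤ 1)) := by
    apply List.filter_congr
    intro n _
    have : decide ((pvDegDict (pvNbDict neighbors)).getD n 0 ≤ 1)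
        = decide (pvDegOf (pvNbDict neighbors) (pvNbDict neighbors).keys n ≤ 1) := by
      rw [pv_degDict_getD _ hnd n]
      exact decide_eq_decide.mpr (by exact_mod_cast Iff.rfl)
    rw [this]
  rw [hfeq]
  exact pv_loop_eq _ hnd _ _ _ hnd _ (pv_degDict_getD _ hnd)
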